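-- pv_equiv track=rewrite | github.com/dorksan/python_labs | slumpy_dogs/labTwo/task1.py | determineRankOfMatrix
-- ===== SOURCE A (Python) =====
-- def determineRankOfMatrix(matrix):
--     numOfRows = len(matrix)
--     numOfColumns = len(matrix[0])
--
--     if numOfColumns != numOfRows or numOfRows > 3 or numOfColumns < 2:
--         return -1
--
--     if numOfRows == 2:
--         if matrix[0][0] * matrix[1][1] - matrix[0][1] * matrix[1][0] != 0:
--             return 2
--         for i in range(2):
--             for j in range(2):
--                 if matrix[i][j] != 0:
--                     return 1
--
--         return 0
--
--     if matrix[0][0] * matrix[1][1] * matrix[2][2] \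
--     + matrix[0][1] * matrix[1][2] * matrix[2][0] \
--     + matrix[0][2] * matrix[2][1] * matrix[1][0] \
--     - matrix[0][2] * matrix[1][1] * matrix[2][0] \
--     - matrix[0][1] * matrix[2][2] * matrix[1][0] \
--     - matrix[0][0] * matrix[1][2] * matrix[2][1] != 0:
--         return 3
--
--     if matrix[1][1] * matrix[2][2] - matrix[1][2] * matrix[2][1] != 0 or \
--     matrix[0][1] * matrix[2][2] - matrix[0][2] * matrix[2][1] != 0 or \
--     matrix[0][1] * matrix[1][2] - matrix[0][2] * matrix[1][1] != 0 or \
--     matrix[1][0] * matrix[2][2] - matrix[1][2] * matrix[2][0] != 0 or \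
--     matrix[0][0] * matrix[2][2] - matrix[0][2] * matrix[2][0] != 0 or \
--     matrix[0][0] * matrix[1][2] - matrix[0][2] * matrix[1][0] != 0 or \
--     matrix[1][0] * matrix[2][1] - matrix[1][1] * matrix[2][0] != 0 or \
--     matrix[0][0] * matrix[2][1] - matrix[0][1] * matrix[2][0] != 0 or \
--     matrix[0][0] * matrix[1][1] - matrix[0][1] * matrix[1][0] != 0:
--         return 2
--
--     for i in range(numOfRows):
--         for j in range(numOfColumns):
--             if matrix[i][j] != 0:
--                 return 1
--
--     return 0
-- ===== SOURCE B (Python) =====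
-- def _det(m):
--     if len(m) == 1:
--         return m[0][0]
--     return sum((-1) ** j * m[0][j] * _det([row[:j] + row[j + 1:] for row in m[1:]])
--                for j in range(len(m[0])))
--
--
-- def _combs(xs, k):
--     if k == 0:
--         return [[]]
--     if not xs:
--         return []
--     rest = xs[1:]
--     return [[xs[0]] + c for c in _combs(rest, k - 1)] + _combs(rest, k)
--
--
-- def determineRankOfMatrix(matrix):
--     n = len(matrix)
--     m = len(matrix[0])
--     if m != n or n > 3 or m < 2:
--         return -1
--     idx = list(range(n))
--     for k in range(n, 0, -1):
--         for rs in _combs(idx, k):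
--             for cs in _combs(idx, k):
--                 if _det([[matrix[r][c] for c in cs] for r in rs]) != 0:
--                     return k
--     return 0
-- ===== Notes on version B (the rewrite author's own statement) =====
-- stated objective: alternative
-- what changed: Replaces A's hand-unrolled case analysis (hard-coded 2x2/3x3 determinant formulas and nine explicit minors) with a generic search: a recursive cofactor determinant and a combinations generator enumerate all k x k minors for k = n..1, returning the first k with a nonzero minor.
import Mathlib
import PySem

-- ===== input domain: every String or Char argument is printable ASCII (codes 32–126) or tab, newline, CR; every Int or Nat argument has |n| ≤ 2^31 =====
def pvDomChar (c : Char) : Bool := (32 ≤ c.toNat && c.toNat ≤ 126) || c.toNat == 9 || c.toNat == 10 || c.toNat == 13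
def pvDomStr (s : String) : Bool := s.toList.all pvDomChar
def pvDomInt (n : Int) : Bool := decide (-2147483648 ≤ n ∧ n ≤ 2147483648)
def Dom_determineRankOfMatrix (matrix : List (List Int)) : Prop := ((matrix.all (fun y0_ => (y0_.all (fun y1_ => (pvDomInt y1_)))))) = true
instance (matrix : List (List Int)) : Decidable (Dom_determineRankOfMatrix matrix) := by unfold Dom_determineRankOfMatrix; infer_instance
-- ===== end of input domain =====

-- B replaces A's hand-unrolled 2x2/3x3 case analysis by a generic minor search
-- (recursive cofactor determinant + combinations of row/column indices); same cost, clearer structure.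


-- ===== PORT A =====
-- matrix[i][j]: indices here are nonnegative literals, in range under Pre_, so List.getD is
-- exact there (Python would raise out of range; those inputs are excluded by Pre_).
def pvGetA (matrix : List (List Int)) (i j : Nat) : Int := (matrix.getD i []).getD j 0

def determineRankOfMatrix (matrix : List (List Int)) : Int :=
  let numOfRows : Int := matrix.length
  let numOfColumns : Int := (matrix.getD 0 []).length
  if numOfColumns ≠ numOfRows ∨ numOfRows > 3 ∨ numOfColumns < 2 then -1
  else if numOfRows = 2 then
    if pvGetA matrix 0 0 * pvGetA matrix 1 1 - pvGetA matrix 0 1 * pvGetA matrix 1 0 ≠ 0 then 2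
    else
      -- the nested 'for i in range(2): for j in range(2): if m[i][j] != 0: return 1'
      match (List.range 2).findSome? (fun i =>
          (List.range 2).findSome? (fun j =>
            if pvGetA matrix i j ≠ 0 then some (1 : Int) else none)) with
      | some v => v
      | none => 0
  else if pvGetA matrix 0 0 * pvGetA matrix 1 1 * pvGetA matrix 2 2
        + pvGetA matrix 0 1 * pvGetA matrix 1 2 * pvGetA matrix 2 0
        + pvGetA matrix 0 2 * pvGetA matrix 2 1 * pvGetA matrix 1 0
        - pvGetA matrix 0 2 * pvGetA matrix 1 1 * pvGetA matrix 2 0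
        - pvGetA matrix 0 1 * pvGetA matrix 2 2 * pvGetA matrix 1 0
        - pvGetA matrix 0 0 * pvGetA matrix 1 2 * pvGetA matrix 2 1 ≠ 0 then 3
  else if pvGetA matrix 1 1 * pvGetA matrix 2 2 - pvGetA matrix 1 2 * pvGetA matrix 2 1 ≠ 0 ∨
          pvGetA matrix 0 1 * pvGetA matrix 2 2 - pvGetA matrix 0 2 * pvGetA matrix 2 1 ≠ 0 ∨
          pvGetA matrix 0 1 * pvGetA matrix 1 2 - pvGetA matrix 0 2 * pvGetA matrix 1 1 ≠ 0 ∨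
          pvGetA matrix 1 0 * pvGetA matrix 2 2 - pvGetA matrix 1 2 * pvGetA matrix 2 0 ≠ 0 ∨
          pvGetA matrix 0 0 * pvGetA matrix 2 2 - pvGetA matrix 0 2 * pvGetA matrix 2 0 ≠ 0 ∨
          pvGetA matrix 0 0 * pvGetA matrix 1 2 - pvGetA matrix 0 2 * pvGetA matrix 1 0 ≠ 0 ∨
          pvGetA matrix 1 0 * pvGetA matrix 2 1 - pvGetA matrix 1 1 * pvGetA matrix 2 0 ≠ 0 ∨
          pvGetA matrix 0 0 * pvGetA matrix 2 1 - pvGetA matrix 0 1 * pvGetA matrix 2 0 ≠ 0 ∨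
          pvGetA matrix 0 0 * pvGetA matrix 1 1 - pvGetA matrix 0 1 * pvGetA matrix 1 0 ≠ 0 then 2
  else
    match (List.range matrix.length).findSome? (fun i =>
        (List.range (matrix.getD 0 []).length).findSome? (fun j =>
          if pvGetA matrix i j ≠ 0 then some (1 : Int) else none)) with
    | some v => v
    | none => 0

-- ===== PORT B =====
-- _det(m): cofactor expansion along the first row; row[:j] + row[j+1:] ported as take/drop
-- (exact: j is a nonnegative Nat).
def pvDet : List (List Int) → Int
  | [] => 0   -- never reached (Python _det is only called on nonempty minors)
  | [r] => r.getD 0 0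
  | r :: rest =>
    (List.range r.length).foldl
      (fun acc j => acc + (-1 : Int) ^ j * r.getD j 0 *
        pvDet (rest.map fun row => row.take j ++ row.drop (j + 1))) 0
termination_by m => m.length
decreasing_by simp

-- _combs(xs, k)
def pvCombs : List Nat → Nat → List (List Nat)
  | _, 0 => [[]]
  | [], _ + 1 => []
  | x :: xs, k + 1 => (pvCombs xs k).map (fun c => x :: c) ++ pvCombs xs (k + 1)

def determineRankOfMatrix_alt (matrix : List (List Int)) : Int :=
  let n : Int := matrix.length
  let m : Int := (matrix.getD 0 []).length
  if m ≠ n ∨ n > 3 ∨ m < 2 then -1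
  else
    let idx := List.range matrix.length
    -- 'for k in range(n, 0, -1): … return k' / fall through to 'return 0'
    match (PySem.List.pyRange n 0 (-1)).findSome? (fun k =>
        (pvCombs idx k.toNat).findSome? (fun rs =>
          (pvCombs idx k.toNat).findSome? (fun cs =>
            if pvDet (rs.map fun r => cs.map fun c => (matrix.getD r []).getD c 0) ≠ 0
            then some k else none))) with
    | some k => k
    | none => 0

-- ===== PRECONDITION & SPEC =====
-- Pre_ excludes exactly the inputs where Python A raises IndexError: the empty matrix
-- (matrix[0]), and matrices passing the squareness guard in which some row is shorter
-- than len(matrix) (the determinant then indexes past the row's end).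
def Pre_determineRankOfMatrix (matrix : List (List Int)) : Prop :=
  matrix ≠ [] ∧
  (((matrix.getD 0 []).length = matrix.length ∧ matrix.length ≤ 3 ∧ 2 ≤ (matrix.getD 0 []).length) →
    ∀ row ∈ matrix, matrix.length ≤ row.length)
instance (matrix : List (List Int)) : Decidable (Pre_determineRankOfMatrix matrix) := by
  unfold Pre_determineRankOfMatrix; infer_instance

def pvWitness_determineRankOfMatrix : List (List Int) := [[1, 2], [3, 4]]

def Spec_determineRankOfMatrix (matrix : List (List Int)) (out : Int) : Prop := out = determineRankOfMatrix_alt matrix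
instance (matrix : List (List Int)) (out : Int) : Decidable (Spec_determineRankOfMatrix matrix out) := by unfold Spec_determineRankOfMatrix; infer_instance

-- ===== CLAIM (what is proved, stated in full; the proofs are below) =====
def Claim_equal_determineRankOfMatrix : Prop := ∀ (matrix : List (List Int)), Dom_determineRankOfMatrix matrix → Pre_determineRankOfMatrix matrix → Spec_determineRankOfMatrix matrix (determineRankOfMatrix matrix)

-- ===== LEMMAS AND PROOFS =====

-- 'return k on the first hit' over a list, when the returned payload is constant.
theorem findSome?_ifconst {α β : Type} (L : List α) (p : α → Prop) [DecidablePred p] (k : β) :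
    L.findSome? (fun x => if p x then some k else none) =
      if ∃ x ∈ L, p x then some k else none := by
  induction L with
  | nil => simp
  | cons a t ih =>
    by_cases h : p a
    · simp [h]
    · simp [h, ih]

theorem findSome?_ifconst' {α β : Type} (L : List α) (p : α → Prop) [DecidablePred p] (k : β) :
    L.findSome? (fun x => if p x then none else some k) =
      if ∃ x ∈ L, ¬ p x then some k else none := by
  induction L with
  | nil => simp
  | cons a t ih =>
    by_cases h : p a
    · simp [h, ih]
    · simp [h]

theorem pyRange2 : PySem.List.pyRange 2 0 (-1) = [2, 1] := by decide
theorem pyRange3 : PySem.List.pyRange 3 0 (-1) = [3, 2, 1] := by decide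

theorem pvDet_two (x1 x2 y1 y2 : Int) :
    pvDet [[x1,x2],[y1,y2]] = x1*y2 - x2*y1 := by
  rw [pvDet]
  · norm_num [pvDet, List.range_succ]; ring
  · simp

theorem pvDet_three (x1 x2 x3 y1 y2 y3 z1 z2 z3 : Int) :
    pvDet [[x1,x2,x3],[y1,y2,y3],[z1,z2,z3]] =
      x1*y2*z3 + x2*y3*z1 + x3*z2*y1 - x3*y2*z1 - x2*z3*y1 - x1*y3*z2 := by
  rw [pvDet]
  · norm_num [pvDet, List.range_succ]; ring
  · simp

-- ===== VERDICT (by name: the statement is the Claim_ definition above) =====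
set_option maxHeartbeats 1000000 in
theorem determineRankOfMatrix_spec : Claim_equal_determineRankOfMatrix := by
  intro matrix _ hpre
  unfold Spec_determineRankOfMatrix
  obtain ⟨hne, hrows⟩ := hpre
  by_cases hg : ((matrix.getD 0 []).length : Int) ≠ (matrix.length : Int) ∨
      ((matrix.length : Int) > 3) ∨ ((matrix.getD 0 []).length : Int) < 2
  · simp only [determineRankOfMatrix, determineRankOfMatrix_alt, if_pos hg]
  · push_neg at hg
    obtain ⟨hm, h3, h2⟩ := hg
    have hmN : (matrix.getD 0 []).length = matrix.length := by exact_mod_cast hm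
    have h3N : matrix.length ≤ 3 := by exact_mod_cast h3
    have h2N : 2 ≤ (matrix.getD 0 []).length := by exact_mod_cast h2
    have hrows' := hrows ⟨hmN, h3N, h2N⟩
    have hlen : matrix.length = 2 ∨ matrix.length = 3 := by omega
    rcases hlen with hlen | hlen
    · obtain ⟨r0, r1, rfl⟩ := List.length_eq_two.mp hlen
      have hr0 : r0.length = 2 := by simpa using hmN
      have hr1 : 2 ≤ r1.length := by simpa using hrows' r1 (by simp)
      obtain ⟨a, b, rfl⟩ := List.length_eq_two.mp hr0
      rcases r1 with _ | ⟨c, r1⟩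
      · exact absurd hr1 (by simp)
      rcases r1 with _ | ⟨d, t⟩
      · exact absurd hr1 (by simp)
      clear! hne hrows hm h3 h2 hmN h3N h2N hrows' hlen hr0 hr1
      simp only [determineRankOfMatrix, determineRankOfMatrix_alt, pvGetA]
      simp [pvCombs, Int.toNat, pyRange2]
      simp only [findSome?_ifconst, findSome?_ifconst']
      simp [pvCombs, List.findSome?, pvDet_two, pvDet, List.range_succ]
      split_ifs <;> first | rfl | tauto
    · obtain ⟨r0, r1, r2, rfl⟩ := List.length_eq_three.mp hlen
      have hr0 : r0.length = 3 := by simpa using hmN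
      have hr1 : 3 ≤ r1.length := by simpa using hrows' r1 (by simp)
      have hr2 : 3 ≤ r2.length := by simpa using hrows' r2 (by simp)
      obtain ⟨a1, a2, a3, rfl⟩ := List.length_eq_three.mp hr0
      rcases r1 with _ | ⟨b1, r1⟩
      · exact absurd hr1 (by simp)
      rcases r1 with _ | ⟨b2, r1⟩
      · exact absurd hr1 (by simp)
      rcases r1 with _ | ⟨b3, t1⟩
      · exact absurd hr1 (by simp)
      rcases r2 with _ | ⟨c1, r2⟩
      · exact absurd hr2 (by simp)
      rcases r2 with _ | ⟨c2, r2⟩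
      · exact absurd hr2 (by simp)
      rcases r2 with _ | ⟨c3, t2⟩
      · exact absurd hr2 (by simp)
      clear! hne hrows hm h3 h2 hmN h3N h2N hrows' hlen hr0 hr1 hr2
      simp only [determineRankOfMatrix, determineRankOfMatrix_alt, pvGetA]
      simp [pvCombs, Int.toNat, pyRange3]
      simp only [findSome?_ifconst, findSome?_ifconst']
      simp [pvCombs, List.findSome?, pvDet_three, pvDet_two, pvDet, List.range_succ]
      split_ifs <;> first | rfl | tauto
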